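-- pv_equiv track=rewrite | github.com/cherenkov-plenoscope/plenoirf | plenoirf/ground_grid/histogram2d.py | _count_bin_occurances
-- ===== SOURCE A (Python) =====
-- def _count_bin_occurances(hist):
--     counts = {}
--     for cell in hist:
--         xy = (cell["x_bin"], cell["y_bin"])
--         if xy in counts:
--             counts[xy].append(cell["weight_photons"])
--         else:
--             counts[xy] = [cell["weight_photons"]]
--     return counts
-- ===== SOURCE B (Python) =====
-- def _count_bin_occurances(hist):
--     # Two-pass grouping: first collect the distinct (x_bin, y_bin) keys in
--     # first-occurrence order, then build each group with one comprehension.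
--     keys = []
--     for cell in hist:
--         xy = (cell["x_bin"], cell["y_bin"])
--         if xy not in keys:
--             keys.append(xy)
--     return {
--         xy: [c["weight_photons"] for c in hist
--              if (c["x_bin"], c["y_bin"]) == xy]
--         for xy in keys
--     }
-- ===== Notes on version B (the rewrite author's own statement) =====
-- stated objective: alternative
-- what changed: Replaces the single-pass conditional-append dict build with a two-pass scheme: collect distinct keys in first-occurrence order, then build each group's weight list with one filtering comprehension over hist.
import Mathlib
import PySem

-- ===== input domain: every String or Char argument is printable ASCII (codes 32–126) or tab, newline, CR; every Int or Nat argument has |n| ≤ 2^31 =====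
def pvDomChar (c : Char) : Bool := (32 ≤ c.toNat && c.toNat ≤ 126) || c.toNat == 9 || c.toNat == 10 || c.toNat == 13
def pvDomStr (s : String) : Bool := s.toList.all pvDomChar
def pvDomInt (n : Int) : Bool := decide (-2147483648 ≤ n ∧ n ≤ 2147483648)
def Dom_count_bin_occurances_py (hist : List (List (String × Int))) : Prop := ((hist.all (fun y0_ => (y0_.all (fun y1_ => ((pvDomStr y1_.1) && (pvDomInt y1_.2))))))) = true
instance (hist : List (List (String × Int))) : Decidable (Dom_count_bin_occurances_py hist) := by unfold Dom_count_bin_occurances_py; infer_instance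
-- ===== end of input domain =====

-- B groups the weights by collecting the distinct (x_bin, y_bin) keys first and then
-- building each group with one filtering pass, instead of A's single-pass conditional
-- dict append (objective: alternative decomposition, same return value).

-- cell[k]; Pre_ guarantees the key is present, so the default 0 is never taken
def pvCellGet (cell : List (String × Int)) (k : String) : Int :=
  (PySem.Dict.mk cell).getD k 0

def pvCellKey (cell : List (String × Int)) : Int × Int :=
  (pvCellGet cell "x_bin", pvCellGet cell "y_bin")

-- ===== PORT A =====
def count_bin_occurances_py (hist : List (List (String × Int))) : List (Int × Int × List Int) :=
  ((hist.foldl (fun (counts : PySem.Dict (Int × Int) (List Int)) cell =>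
      let xy := pvCellKey cell
      if counts.contains xy then
        counts.insert xy (counts.getD xy [] ++ [pvCellGet cell "weight_photons"])
      else
        counts.insert xy [pvCellGet cell "weight_photons"])
    PySem.Dict.empty).items).map (fun p => (p.1.1, p.1.2, p.2))

-- ===== PORT B =====
def count_bin_occurances_py_alt (hist : List (List (String × Int))) : List (Int × Int × List Int) :=
  let keys := hist.foldl (fun (ks : List (Int × Int)) cell =>
      let xy := pvCellKey cell
      if xy ∈ ks then ks else ks ++ [xy]) []
  keys.map (fun xy =>
    (xy.1, xy.2, (hist.filter (fun c => pvCellKey c == xy)).map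
      (fun c => pvCellGet c "weight_photons")))

-- ===== PRECONDITION & SPEC =====
-- Pre_ excludes cells missing one of the keys "x_bin"/"y_bin"/"weight_photons", on which A raises KeyError.
def Pre_count_bin_occurances_py (hist : List (List (String × Int))) : Prop :=
  ∀ cell ∈ hist, ((PySem.Dict.mk cell).get? "x_bin").isSome
    ∧ ((PySem.Dict.mk cell).get? "y_bin").isSome
    ∧ ((PySem.Dict.mk cell).get? "weight_photons").isSome

instance (hist : List (List (String × Int))) : Decidable (Pre_count_bin_occurances_py hist) := by
  unfold Pre_count_bin_occurances_py; infer_instance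

def pvWitness_count_bin_occurances_py : (List (List (String × Int))) :=
  [[("x_bin", 0), ("y_bin", 1), ("weight_photons", 7)],
   [("x_bin", 0), ("y_bin", 1), ("weight_photons", 3)]]

def Spec_count_bin_occurances_py (hist : List (List (String × Int))) (out : List (Int × Int × List Int)) : Prop := out = count_bin_occurances_py_alt hist
instance (hist : List (List (String × Int))) (out : List (Int × Int × List Int)) : Decidable (Spec_count_bin_occurances_py hist out) := by unfold Spec_count_bin_occurances_py; infer_instance

-- ===== CLAIM (what is proved, stated in full; the proofs are below) =====
def Claim_equal_count_bin_occurances_py : Prop := ∀ (hist : List (List (String × Int))), Dom_count_bin_occurances_py hist → Pre_count_bin_occurances_py hist → Spec_count_bin_occurances_py hist (count_bin_occurances_py hist)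

-- ===== LEMMAS AND PROOFS =====

def pvWeight (cell : List (String × Int)) : Int := pvCellGet cell "weight_photons"

-- A's two branches are one dict "modify": append to the existing group, or start a new one
lemma stepA_eq_modify (d : PySem.Dict (Int × Int) (List Int)) (c : List (String × Int)) :
    (if d.contains (pvCellKey c) then
        d.insert (pvCellKey c) (d.getD (pvCellKey c) [] ++ [pvCellGet c "weight_photons"])
      else d.insert (pvCellKey c) [pvCellGet c "weight_photons"])
      = d.modify (pvCellKey c) [] (· ++ [pvCellGet c "weight_photons"]) := by
  cases h : d.contains (pvCellKey c) with
  | true => simp [PySem.Dict.modify]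
  | false => simp [PySem.Dict.modify, PySem.Dict.getD_of_not_contains d [] h]

-- A's loop as a grouping fold over (key, weight) pairs
lemma foldA_eq (hist : List (List (String × Int))) :
    hist.foldl (fun (counts : PySem.Dict (Int × Int) (List Int)) cell =>
      let xy := pvCellKey cell
      if counts.contains xy then
        counts.insert xy (counts.getD xy [] ++ [pvCellGet cell "weight_photons"])
      else
        counts.insert xy [pvCellGet cell "weight_photons"]) PySem.Dict.empty
    = (hist.map (fun c => (pvCellKey c, pvWeight c))).foldl
        (fun d p => d.modify p.1 [] (· ++ [p.2])) PySem.Dict.empty := by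
  rw [List.foldl_map]
  congr 1
  funext d c
  exact stepA_eq_modify d c

-- A's final dict
def pvD (hist : List (List (String × Int))) : PySem.Dict (Int × Int) (List Int) :=
  (hist.map (fun c => (pvCellKey c, pvWeight c))).foldl
    (fun d p => d.modify p.1 [] (· ++ [p.2])) PySem.Dict.empty

lemma keys_pvD (hist : List (List (String × Int))) :
    (pvD hist).keys = PySem.Set.ofList (hist.map pvCellKey) := by
  rw [pvD, PySem.Dict.keys_foldl_modify_key]
  simp [Function.comp_def, PySem.Set.update_nil_left]

lemma nodup_keys_pvD (hist : List (List (String × Int))) : (pvD hist).keys.Nodup := by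
  rw [keys_pvD]; exact PySem.Set.nodup_ofList _

lemma getD_pvD (hist : List (List (String × Int))) (k : Int × Int) :
    (pvD hist).getD k [] = (hist.filter (fun c => pvCellKey c == k)).map pvWeight := by
  rw [pvD, PySem.Dict.getD_foldl_modify_append]
  rw [List.filter_map, List.map_map]
  simp [Function.comp_def]

-- B's first pass computes the distinct keys in first-occurrence order
lemma keysB_eq (hist : List (List (String × Int))) :
    hist.foldl (fun (ks : List (Int × Int)) cell =>
      let xy := pvCellKey cell
      if xy ∈ ks then ks else ks ++ [xy]) []
    = PySem.Set.ofList (hist.map pvCellKey) := by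
  rw [← PySem.Set.update_nil_left, PySem.Set.update_map_eq_foldl_add]
  congr 1
  funext ks c
  exact (PySem.Set.add_eq_ite ks (pvCellKey c)).symm

-- the common normal form of both programs
def pvGroups (hist : List (List (String × Int))) : List (Int × Int × List Int) :=
  (PySem.Set.ofList (hist.map pvCellKey)).map (fun k =>
    (k.1, k.2, (hist.filter (fun c => pvCellKey c == k)).map pvWeight))

lemma A_eq (hist : List (List (String × Int))) :
    count_bin_occurances_py hist = pvGroups hist := by
  unfold count_bin_occurances_py
  rw [foldA_eq]
  rw [show (hist.map (fun c => (pvCellKey c, pvWeight c))).foldl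
        (fun d p => d.modify p.1 [] (· ++ [p.2])) PySem.Dict.empty = pvD hist from rfl]
  rw [PySem.Dict.items_eq_map_keys (pvD hist) (nodup_keys_pvD hist) ([] : List Int)]
  rw [keys_pvD, List.map_map, pvGroups]
  refine List.map_congr_left ?_
  intro k _
  simp [getD_pvD]

lemma B_eq (hist : List (List (String × Int))) :
    count_bin_occurances_py_alt hist = pvGroups hist := by
  unfold count_bin_occurances_py_alt
  rw [keysB_eq, pvGroups]
  rfl

-- ===== VERDICT (by name: the statement is the Claim_ definition above) =====
theorem count_bin_occurances_py_spec : Claim_equal_count_bin_occurances_py := by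
  intro hist _ _
  unfold Spec_count_bin_occurances_py
  exact (A_eq hist).trans (B_eq hist).symm
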